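-- pv_equiv track=rewrite | github.com/fern17/programming_problems | other/bit_manipulation.py | flip_to_win
-- ===== SOURCE A (Python) =====
-- def flip_to_win(value):
--     """
--     Flip bit to win: Given an integer K. Write code to find the length of the
--     longest sequences of 1 you can find by flipping a bit from 0 to 1.
--     """
--     longest_so_far = 1
--     current_length = 0
--     previous_length = 0
--     while value != 0:
--         if value & 1 == 1:
--             current_length += 1
--         elif value & 1 == 0:
--             previous_length = 0 if value & 2 == 0 else current_length
--             current_length = 0
--         longest_so_far = max(previous_length + current_length + 1, longest_so_far)
--         value = int(value / 2)
--     return longest_so_far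
-- ===== SOURCE B (Python) =====
-- def flip_to_win(value):
--     # Two-phase: extract the bits LSB-first exactly as A does, collapse them
--     # into maximal runs, then take the best of r+1 and single-zero bridges.
--     bits = []
--     while value != 0:
--         bits.append(value & 1)
--         value = int(value / 2)
--     # collapse into (bit, run_length) segments, consecutive equal bits grouped
--     def collapse(bs):
--         if not bs:
--             return []
--         b = bs[0]
--         i = 1
--         while i < len(bs) and bs[i] == b:
--             i += 1
--         return [(b, i)] + collapse(bs[i:])
--     segs = collapse(bits)
--     if segs and segs[0][0] == 0:
--         segs = segs[1:]
--     best = 1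
--     while segs:
--         r = segs[0][1]
--         best = max(best, r + 1)
--         if len(segs) >= 3 and segs[1][1] == 1:
--             best = max(best, r + segs[2][1] + 1)
--         segs = segs[2:]
--     return best
-- ===== Notes on version B (the rewrite author's own statement) =====
-- stated objective: alternative
-- what changed: A interleaves run counting with bit extraction in one stateful loop (current/previous run counters); B first extracts the bit list, collapses it into maximal runs, and then combines run lengths (r+1, and r_a+r_b+1 across single-zero gaps) in a separate pass.
import Mathlib
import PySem

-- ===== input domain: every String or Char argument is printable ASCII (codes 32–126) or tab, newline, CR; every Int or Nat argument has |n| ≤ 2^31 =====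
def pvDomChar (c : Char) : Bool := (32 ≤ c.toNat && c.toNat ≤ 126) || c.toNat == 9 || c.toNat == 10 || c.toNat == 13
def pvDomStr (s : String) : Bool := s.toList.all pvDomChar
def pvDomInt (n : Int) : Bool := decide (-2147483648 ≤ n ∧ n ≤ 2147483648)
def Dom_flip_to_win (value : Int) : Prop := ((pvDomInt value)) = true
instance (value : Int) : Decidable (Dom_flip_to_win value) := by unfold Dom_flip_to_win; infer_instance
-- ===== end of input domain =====

-- B re-implements the single scan as a two-phase pipeline (extract bits, collapse to runs,
-- combine run lengths); objective: alternative decomposition, equal value everywhere.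

-- ===== PORT A =====
-- `int(value / 2)` is truncating division, Int.tdiv (exact: float division by 2 is exact for |value| ≤ 2^31)
def flip_to_winLoop (value longest cur prev : Int) : Int :=
  if h : value = 0 then longest
  else
    let s : Int × Int :=
      if PySem.Int.band value 1 = 1 then (cur + 1, prev)
      else if PySem.Int.band value 1 = 0 then (0, if PySem.Int.band value 2 = 0 then 0 else cur)
      else (cur, prev)
    flip_to_winLoop (Int.tdiv value 2) (max (s.2 + s.1 + 1) longest) s.1 s.2
termination_by value.natAbs
decreasing_by
  have := Int.natAbs_pos.mpr h
  calc (Int.tdiv value 2).natAbs = value.natAbs / 2 := by rw [Int.natAbs_tdiv]; rfl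
    _ < value.natAbs := by omega

def flip_to_win (value : Int) : Int := flip_to_winLoop value 1 0 0

-- ===== PORT B =====
-- bit extraction, identical traversal to A's loop (`int(value / 2)` = Int.tdiv, see above)
def pvBitsOf (value : Int) : List Int :=
  if h : value = 0 then []
  else PySem.Int.band value 1 :: pvBitsOf (Int.tdiv value 2)
termination_by value.natAbs
decreasing_by
  have := Int.natAbs_pos.mpr h
  calc (Int.tdiv value 2).natAbs = value.natAbs / 2 := by rw [Int.natAbs_tdiv]; rfl
    _ < value.natAbs := by omega

-- Source B's recursive collapse: the inner `while` counts the equal prefix of the tail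
def pvCollapse : List Int → List (Int × Int)
  | [] => []
  | b :: rest =>
    let k := (rest.takeWhile (· == b)).length
    (b, (k : Int) + 1) :: pvCollapse (rest.drop k)
termination_by l => l.length
decreasing_by
  rw [List.length_drop, List.length_cons]
  omega

-- Source B's final while loop over segs (stepping by two segments, one-segment lookahead bridge)
def pvBestLoop : List (Int × Int) → Int → Int
  | [], best => best
  | s0 :: rest, best =>
    let best := max best (s0.2 + 1)
    let best :=
      match rest with
      | s1 :: s2 :: _ => if s1.2 = 1 then max best (s0.2 + s2.2 + 1) else best
      | _ => best
    pvBestLoop (rest.drop 1) best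
termination_by l _ => l.length
decreasing_by
  rw [List.length_drop, List.length_cons]
  omega

def flip_to_win_alt (value : Int) : Int :=
  let segs := pvCollapse (pvBitsOf value)
  let segs :=
    match segs with
    | (b, r) :: tail => if b = 0 then tail else (b, r) :: tail
    | [] => []
  pvBestLoop segs 1

-- ===== PRECONDITION & SPEC =====
def Spec_flip_to_win (value : Int) (out : Int) : Prop := out = flip_to_win_alt value
instance (value : Int) (out : Int) : Decidable (Spec_flip_to_win value out) := by unfold Spec_flip_to_win; infer_instance

-- ===== CLAIM (what is proved, stated in full; the proofs are below) =====
def Claim_equal_flip_to_win : Prop := ∀ (value : Int), Dom_flip_to_win value → Spec_flip_to_win value (flip_to_win value)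

-- ===== LEMMAS AND PROOFS =====

-- bit-level facts about PySem.Int.band
theorem pvNatAndTwo (n : Nat) : n &&& 2 = 2 * ((n/2) &&& 1) := by
  have h := Nat.and_two_pow n 1
  norm_num at h
  have ht : n.testBit 1 = (n/2).testBit 0 := Nat.testBit_succ n 0
  rw [h, ht, Nat.testBit_zero, Nat.and_one_is_mod]
  rcases Nat.mod_two_eq_zero_or_one (n/2) with h2 | h2 <;> simp [h2]

theorem pvBand2Iff (w : Int) : (PySem.Int.band (2*w) 2 = 0 ↔ PySem.Int.band w 1 = 0) := by
  unfold PySem.Int.band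
  rcases le_or_gt 0 w with hw | hw
  · rw [if_pos (by omega : (0:Int) ≤ 2*w), if_pos (by norm_num : (0:Int) ≤ 2),
        if_pos hw, if_pos (by norm_num : (0:Int) ≤ 1)]
    have h2 : (2*w).toNat = 2 * w.toNat := by omega
    have h3 : Int.toNat 2 = 2 := rfl
    have h4 : Int.toNat 1 = 1 := rfl
    rw [h2, h3, h4, pvNatAndTwo, Nat.and_one_is_mod, Nat.and_one_is_mod]
    have h5 : (2 * w.toNat) / 2 = w.toNat := by omega
    rw [h5]
    constructor <;> intro h <;> (norm_cast at h ⊢) <;> omega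
  · rw [if_neg (by omega : ¬ (0:Int) ≤ 2*w), if_pos (by norm_num : (0:Int) ≤ 2),
        if_neg (by omega : ¬ (0:Int) ≤ w), if_pos (by norm_num : (0:Int) ≤ 1)]
    have h3 : Int.toNat 2 = 2 := rfl
    have h4 : Int.toNat 1 = 1 := rfl
    rw [h3, h4]
    have hm : (-(2*w)-1).toNat = 2*((-w-1).toNat)+1 := by omega
    have hm2 : (2*((-w-1).toNat)+1)/2 = (-w-1).toNat := by omega
    rw [hm, Nat.and_comm 2 _, Nat.and_comm 1 _, pvNatAndTwo, hm2, Nat.and_one_is_mod]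
    rcases Nat.mod_two_eq_zero_or_one ((-w-1).toNat) with h2 | h2 <;> rw [h2] <;> norm_num

theorem pvBand01 (v : Int) : PySem.Int.band v 1 = 0 ∨ PySem.Int.band v 1 = 1 := by
  rw [PySem.Int.band_one]
  have h1 := PySem.Int.mod_nonneg v (b := 2) (by norm_num)
  have h2 := PySem.Int.mod_lt v (b := 2) (by norm_num)
  omega

theorem pvBandEven (v : Int) (h : PySem.Int.band v 1 = 0) : 2 ∣ v := by
  rw [PySem.Int.band_one] at h
  exact (PySem.Int.mod_eq_zero_iff_dvd v 2).mp h

-- A's loop re-expressed over the extracted bit list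
def pvFA : List Int → Int → Int → Int → Int
  | [], l, _, _ => l
  | b :: rest, l, c, p =>
    if b = 1 then pvFA rest (max (p + (c+1) + 1) l) (c+1) p
    else
      pvFA rest (max ((if rest.headD 0 = 0 then 0 else c) + 0 + 1) l) 0
        (if rest.headD 0 = 0 then 0 else c)

theorem pvBits_nil (v : Int) : pvBitsOf v = [] ↔ v = 0 := by
  constructor
  · intro h
    by_contra hv
    rw [pvBitsOf, dif_neg hv] at h
    simp at h
  · intro h; subst h; rw [pvBitsOf]; simp

theorem pvBits_cons (v : Int) (h : v ≠ 0) :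
    pvBitsOf v = PySem.Int.band v 1 :: pvBitsOf (Int.tdiv v 2) := by
  rw [pvBitsOf, dif_neg h]

theorem pvTdiv_natAbs (v : Int) : (Int.tdiv v 2).natAbs = v.natAbs / 2 := by
  rw [Int.natAbs_tdiv]; rfl

theorem pvCorrAux : ∀ (n : Nat) (v l c p : Int), v.natAbs ≤ n →
    flip_to_winLoop v l c p = pvFA (pvBitsOf v) l c p := by
  intro n
  induction n with
  | zero =>
    intro v l c p hv
    have hv0 : v = 0 := by omega
    subst hv0
    rw [flip_to_winLoop, pvBitsOf]
    simp [pvFA]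
  | succ n ih =>
    intro v l c p hv
    by_cases h : v = 0
    · subst h; rw [flip_to_winLoop, pvBitsOf]; simp [pvFA]
    · rw [flip_to_winLoop, dif_neg h, pvBits_cons v h]
      have hrec : ∀ l' c' p', flip_to_winLoop (Int.tdiv v 2) l' c' p'
          = pvFA (pvBitsOf (Int.tdiv v 2)) l' c' p' := by
        intro l' c' p'
        apply ih
        have h2 := pvTdiv_natAbs v
        have h3 := Int.natAbs_pos.mpr h
        omega
      rcases pvBand01 v with hb | hb
      · -- even step
        rw [hb]
        norm_num [pvFA]
        obtain ⟨w, hw⟩ := pvBandEven v hb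
        have htd : Int.tdiv v 2 = w := by rw [hw]; exact Int.mul_tdiv_cancel_left w (by norm_num)
        have hwne : w ≠ 0 := by rintro rfl; simp at hw; exact h hw
        have hhead : (pvBitsOf (Int.tdiv v 2)).headD 0 = PySem.Int.band w 1 := by
          rw [htd, pvBits_cons w hwne]; rfl
        have hiff : PySem.Int.band v 2 = 0 ↔ (pvBitsOf (Int.tdiv v 2)).headD 0 = 0 := by
          rw [hhead, hw]; exact pvBand2Iff w
        simp only [List.headD_eq_head?_getD] at hiff
        by_cases h2 : PySem.Int.band v 2 = 0
        · rw [if_pos h2, if_pos (hiff.mp h2)]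
          norm_num [hrec]
        · rw [if_neg h2, if_neg (fun hh => h2 (hiff.mpr hh))]
          norm_num [hrec]
      · -- odd step
        rw [hb]
        norm_num [pvFA, hrec]

theorem pvCorr (v l c p : Int) : flip_to_winLoop v l c p = pvFA (pvBitsOf v) l c p :=
  pvCorrAux v.natAbs v l c p le_rfl

-- facts about the extracted bits
theorem pvBits01Aux : ∀ (n : Nat) (v : Int), v.natAbs ≤ n → ∀ b ∈ pvBitsOf v, b = 0 ∨ b = 1 := by
  intro n
  induction n with
  | zero =>
    intro v hv b hb
    have hv0 : v = 0 := by omega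
    subst hv0
    rw [(pvBits_nil 0).mpr rfl] at hb
    simp at hb
  | succ n ih =>
    intro v hv b hb
    by_cases h : v = 0
    · subst h; rw [(pvBits_nil 0).mpr rfl] at hb; simp at hb
    · rw [pvBits_cons v h] at hb
      rcases List.mem_cons.mp hb with hb | hb
      · subst hb; exact pvBand01 v
      · refine ih (Int.tdiv v 2) ?_ b hb
        have h2 := pvTdiv_natAbs v
        have h3 := Int.natAbs_pos.mpr h
        omega

theorem pvBits01 (v : Int) : ∀ b ∈ pvBitsOf v, b = 0 ∨ b = 1 :=
  pvBits01Aux v.natAbs v le_rfl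

theorem pvBitsLastAux : ∀ (n : Nat) (v : Int), v.natAbs ≤ n → v ≠ 0 →
    (pvBitsOf v).getLast? = some 1 := by
  intro n
  induction n with
  | zero =>
    intro v hv hne
    exact absurd (by omega : v = 0) hne
  | succ n ih =>
    intro v hv hne
    rw [pvBits_cons v hne]
    by_cases h2 : Int.tdiv v 2 = 0
    · rw [(pvBits_nil _).mpr h2]
      have hnat : v.natAbs ≤ 1 := by
        have := pvTdiv_natAbs v
        have h3 := Int.natAbs_eq_zero.mpr h2
        omega
      have : v = 1 ∨ v = -1 := by
        rcases Int.natAbs_eq v with he | he <;> omega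
      rcases this with rfl | rfl <;> decide
    · obtain ⟨x, xs, hx⟩ : ∃ x xs, pvBitsOf (Int.tdiv v 2) = x :: xs := by
        rcases he : pvBitsOf (Int.tdiv v 2) with _ | ⟨x, xs⟩
        · exact absurd ((pvBits_nil _).mp he) h2
        · exact ⟨x, xs, rfl⟩
      rw [hx, List.getLast?_cons_cons, ← hx]
      refine ih (Int.tdiv v 2) ?_ h2
      have h3 := pvTdiv_natAbs v
      have h4 := Int.natAbs_pos.mpr hne
      omega

theorem pvBitsLast (v : Int) (h : v ≠ 0) : (pvBitsOf v).getLast? = some 1 :=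
  pvBitsLastAux v.natAbs v le_rfl h

-- takeWhile / dropWhile bookkeeping for pvCollapse
theorem pvTakeTW (p : Int → Bool) : ∀ (l : List Int), l.take (l.takeWhile p).length = l.takeWhile p := by
  intro l
  induction l with
  | nil => rfl
  | cons a l ih =>
    by_cases h : p a
    · simp [List.takeWhile_cons, h, ih]
    · simp [List.takeWhile_cons, h]

theorem pvDropTW (p : Int → Bool) : ∀ (l : List Int), l.drop (l.takeWhile p).length = l.dropWhile p := by
  intro l
  induction l with
  | nil => rfl
  | cons a l ih =>
    by_cases h : p a
    · simp [List.takeWhile_cons, List.dropWhile_cons, h, ih]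
    · simp [List.takeWhile_cons, List.dropWhile_cons, h]

theorem pvDropWhileHead (p : Int → Bool) : ∀ (l : List Int) (x : Int) (xs : List Int),
    l.dropWhile p = x :: xs → p x = false := by
  intro l
  induction l with
  | nil => intro x xs h; simp at h
  | cons a l ih =>
    intro x xs h
    by_cases hp : p a
    · rw [List.dropWhile_cons, if_pos hp] at h
      exact ih x xs h
    · rw [List.dropWhile_cons, if_neg hp] at h
      cases h
      simpa using hp

theorem pvTWRepl (b : Int) (l : List Int) :
    l.takeWhile (· == b) = List.replicate (l.takeWhile (· == b)).length b := by
  apply List.eq_replicate_of_mem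
  intro x hx
  have := List.mem_takeWhile_imp hx
  simpa using this

def pvExpand (segs : List (Int × Int)) : List Int :=
  segs.flatMap (fun s => List.replicate s.2.toNat s.1)

theorem pvExpand_cons (b m : Int) (tail : List (Int × Int)) :
    pvExpand ((b, m) :: tail) = List.replicate m.toNat b ++ pvExpand tail := by
  simp [pvExpand]

theorem pvCollapse_cons (b : Int) (rest : List Int) :
    pvCollapse (b :: rest)
      = (b, ((rest.takeWhile (· == b)).length : Int) + 1)
        :: pvCollapse (rest.drop (rest.takeWhile (· == b)).length) := by
  rw [pvCollapse]

theorem pvExpandCollapseAux : ∀ (n : Nat) (bs : List Int), bs.length ≤ n →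
    pvExpand (pvCollapse bs) = bs := by
  intro n
  induction n with
  | zero =>
    intro bs h
    have : bs = [] := by
      cases bs
      · rfl
      · simp at h
    subst this; simp [pvCollapse, pvExpand]
  | succ n ih =>
    intro bs h
    cases bs with
    | nil => simp [pvCollapse, pvExpand]
    | cons b rest =>
      rw [pvCollapse_cons, pvExpand_cons]
      have hk : ((((rest.takeWhile (· == b)).length : Int) + 1)).toNat
          = (rest.takeWhile (· == b)).length + 1 := by omega
      rw [hk]
      have hrec : pvExpand (pvCollapse (rest.drop (rest.takeWhile (· == b)).length))
          = rest.drop (rest.takeWhile (· == b)).length := by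
        apply ih
        have := List.length_drop (l := rest) (i := (rest.takeWhile (· == b)).length)
        simp at h ⊢
        omega
      rw [hrec]
      have : List.replicate ((rest.takeWhile (· == b)).length + 1) b
          = b :: rest.take (rest.takeWhile (· == b)).length := by
        rw [List.replicate_succ, pvTakeTW]
        rw [← pvTWRepl]
      rw [this]
      simp [List.take_append_drop]

theorem pvExpandCollapse (bs : List Int) : pvExpand (pvCollapse bs) = bs :=
  pvExpandCollapseAux bs.length bs le_rfl

-- well-formed alternating run lists (LSB first, starting and ending with a run of 1s)
inductive pvWF1 : List (Int × Int) → Prop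
  | nil : pvWF1 []
  | single (r : Int) : 1 ≤ r → pvWF1 [(1, r)]
  | cons (r z : Int) (rest : List (Int × Int)) :
      1 ≤ r → 1 ≤ z → rest ≠ [] → pvWF1 rest → pvWF1 ((1, r) :: (0, z) :: rest)

theorem pvWF1_head {segs : List (Int × Int)} (h : pvWF1 segs) (hne : segs ≠ []) :
    ∃ r tail, segs = (1, r) :: tail ∧ 1 ≤ r := by
  cases h with
  | nil => exact absurd rfl hne
  | single r hr => exact ⟨r, [], rfl, hr⟩
  | cons r z rest hr hz hne2 hrest => exact ⟨r, (0, z) :: rest, rfl, hr⟩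

theorem pvCollapseShapeAux : ∀ (n : Nat) (bs : List Int), bs.length ≤ n →
    (∀ b ∈ bs, b = 0 ∨ b = 1) → bs.getLast? = some 1 →
    (bs.headD 0 = 1 ∧ pvWF1 (pvCollapse bs) ∧ pvCollapse bs ≠ []) ∨
    (∃ z tail, bs.headD 0 = 0 ∧ pvCollapse bs = (0, z) :: tail ∧ 1 ≤ z ∧ pvWF1 tail ∧ tail ≠ []) := by
  intro n
  induction n with
  | zero =>
    intro bs h h01 hlast
    have : bs = [] := by
      cases bs
      · rfl
      · simp at h
    subst this; simp at hlast
  | succ n ih =>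
    intro bs h h01 hlast
    cases bs with
    | nil => simp at hlast
    | cons b rest =>
      have hb : b = 0 ∨ b = 1 := h01 b (List.mem_cons_self)
      set k := (rest.takeWhile (· == b)).length with hkdef
      have hsplit : b :: rest = (b :: rest.take k) ++ rest.drop k := by
        simp [List.take_append_drop]
      rcases hrest : rest.drop k with _ | ⟨y, ys⟩
      · -- the whole list is one run of b
        have hrepl : b :: rest = List.replicate (k + 1) b := by
          rw [hsplit, hrest, List.append_nil, List.replicate_succ, hkdef, pvTakeTW, ← pvTWRepl]
        have hb1 : b = 1 := by
          have := hlast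
          rw [hrepl, List.getLast?_replicate] at this
          simp at this
          omega
        subst hb1
        left
        rw [pvCollapse_cons, ← hkdef, hrest]
        refine ⟨rfl, ?_, by simp⟩
        rw [pvCollapse]
        exact pvWF1.single _ (by omega)
      · -- a run of b, then a different bit y
        have hdw : rest.dropWhile (· == b) = y :: ys := by
          rw [← pvDropTW, ← hkdef, hrest]
        have hyb : y ≠ b := by
          have := pvDropWhileHead _ rest y ys hdw
          simpa using this
        have hymem : y ∈ b :: rest := by
          have : y ∈ rest.drop k := by rw [hrest]; exact List.mem_cons_self
          exact List.mem_cons_of_mem b (List.mem_of_mem_drop this)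
        have hy : y = 0 ∨ y = 1 := h01 y hymem
        have hlen : (rest.drop k).length ≤ n := by
          rw [List.length_drop]
          simp at h
          omega
        have h01' : ∀ x ∈ rest.drop k, x = 0 ∨ x = 1 := by
          intro x hx
          exact h01 x (List.mem_cons_of_mem b (List.mem_of_mem_drop hx))
        have hlast' : (rest.drop k).getLast? = some 1 := by
          have : (b :: rest).getLast? = (rest.drop k).getLast? := by
            rw [hsplit]
            exact List.getLast?_append_of_ne_nil _ (by rw [hrest]; simp)
          rw [← this, hlast]
        have hshape := ih (rest.drop k) hlen h01' hlast'
        rcases hb with hb0 | hb1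
        · -- leading zero run
          subst hb0
          have hy1 : y = 1 := hy.resolve_left hyb
          right
          rcases hshape with ⟨hhd, hwf, hne⟩ | ⟨z, tail, hhd, _, _, _, _⟩
          · refine ⟨(k : Int) + 1, pvCollapse (rest.drop k), rfl, ?_, by omega, hwf, ?_⟩
            · rw [pvCollapse_cons, ← hkdef]
            · exact hne
          · rw [hrest] at hhd
            simp [hy1] at hhd
        · -- leading one run
          subst hb1
          have hy0 : y = 0 := hy.resolve_right hyb
          left
          rcases hshape with ⟨hhd, _, _⟩ | ⟨z, tail, hhd, hcol, hz, hwf, hne⟩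
          · rw [hrest] at hhd
            simp [hy0] at hhd
          · refine ⟨rfl, ?_, ?_⟩
            · rw [pvCollapse_cons, ← hkdef, hcol]
              exact pvWF1.cons _ _ _ (by omega) hz hne hwf
            · rw [pvCollapse_cons]; simp

-- loop-shape lemmas for pvFA
theorem pvFA_deadP (bs : List Int) (l c p q : Int) (h : bs.headD 0 ≠ 1) :
    pvFA bs l c p = pvFA bs l c q := by
  cases bs with
  | nil => rfl
  | cons b rest =>
    have hb : b ≠ 1 := by simpa using h
    simp only [pvFA, if_neg hb]

theorem pvFA_run : ∀ (k : Nat) (rest : List Int) (l c p : Int),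
    pvFA (List.replicate (k+1) 1 ++ rest) l c p
      = pvFA rest (max (p + c + (k+1 : Nat) + 1) l) (c + (k+1 : Nat)) p := by
  intro k
  induction k with
  | zero =>
    intro rest l c p
    show pvFA (1 :: rest) l c p = _
    rw [pvFA, if_pos rfl]
    norm_num
    rw [show p + (c + 1) + 1 = p + c + 1 + 1 from by ring]
  | succ k ih =>
    intro rest l c p
    show pvFA (1 :: (List.replicate (k+1) 1 ++ rest)) l c p = _
    rw [pvFA, if_pos rfl, ih]
    have h1 : p + (c+1) + (k+1 : Nat) + 1 = p + c + ((k+1)+1 : Nat) + 1 := by push_cast; ring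
    have h2 : max (p + c + (((k+1)+1 : Nat) : Int) + 1) (max (p + (c+1) + 1) l)
        = max (p + c + (((k+1)+1 : Nat) : Int) + 1) l := by
      push_cast
      omega
    rw [h1, h2]
    congr 1
    push_cast
    ring

theorem pvFA_zero_one (rest : List Int) (l c p : Int) (h : rest.headD 0 = 1) :
    pvFA (0 :: rest) l c p = pvFA rest (max (c + 1) l) 0 c := by
  rw [pvFA]
  rw [List.headD_eq_head?_getD] at h
  norm_num [h]

theorem pvFA_zero_zero (rest : List Int) (l c p : Int) (h : rest.headD 0 = 0) :
    pvFA (0 :: rest) l c p = pvFA rest (max 1 l) 0 0 := by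
  rw [pvFA]
  rw [List.headD_eq_head?_getD] at h
  norm_num [h]

theorem pvFA_zeros : ∀ (z : Nat) (rest : List Int) (l : Int), rest.headD 0 = 1 →
    pvFA (List.replicate (z+1) 0 ++ rest) l 0 0 = pvFA rest (max 1 l) 0 0 := by
  intro z
  induction z with
  | zero =>
    intro rest l h
    show pvFA (0 :: rest) l 0 0 = _
    rw [pvFA_zero_one rest l 0 0 h]
    norm_num
  | succ z ih =>
    intro rest l h
    show pvFA (0 :: (List.replicate (z+1) 0 ++ rest)) l 0 0 = _
    rw [pvFA_zero_zero _ l 0 0 (by simp [List.replicate_succ]), ih rest _ h]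
    congr 1
    omega

theorem pvExpandHead {segs : List (Int × Int)} (h : pvWF1 segs) (hne : segs ≠ []) :
    (pvExpand segs).headD 0 = 1 := by
  obtain ⟨r, tail, rfl, hr⟩ := pvWF1_head h hne
  rw [pvExpand_cons]
  have : r.toNat = (r.toNat - 1) + 1 := by omega
  rw [this, List.replicate_succ]
  rfl

theorem pvFA_bridge {segs : List (Int × Int)} (h : pvWF1 segs) (r : Int) (tail : List (Int × Int))
    (hseg : segs = (1, r) :: tail) (l p : Int) (hp : 0 ≤ p) :
    pvFA (pvExpand segs) l 0 p = pvFA (pvExpand segs) (max (p + r + 1) l) 0 0 := by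
  have hr : 1 ≤ r := by
    obtain ⟨r', tail', he, hr'⟩ := pvWF1_head h (by rw [hseg]; simp)
    rw [hseg] at he
    cases he
    exact hr'
  subst hseg
  rw [pvExpand_cons]
  have hrn : r.toNat = (r.toNat - 1) + 1 := by omega
  rw [hrn, pvFA_run, pvFA_run]
  have hc : ((r.toNat - 1 + 1 : Nat) : Int) = r := by omega
  rw [hc]
  have hdead : (pvExpand tail).headD 0 ≠ 1 := by
    cases h with
    | single r hr => simp [pvExpand]
    | cons r z rest hr hz hne hrest =>
      rw [pvExpand_cons]
      have : z.toNat = (z.toNat - 1) + 1 := by omega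
      rw [this, List.replicate_succ]
      norm_num
  rw [pvFA_deadP _ _ _ p 0 hdead]
  congr 1
  omega

theorem pvBestLoop_single (s : Int × Int) (best : Int) : pvBestLoop [s] best = max best (s.2+1) := by
  simp [pvBestLoop]

theorem pvBestLoop_three (r z rb : Int) (tail : List (Int × Int)) (best : Int) :
    pvBestLoop ((1,r) :: (0,z) :: (1,rb) :: tail) best
      = pvBestLoop ((1,rb) :: tail) (if z = 1 then max (max best (r+1)) (r + rb + 1) else max best (r+1)) := by
  rw [pvBestLoop]
  split <;> rfl

-- the central lemma: pvFA over the expansion of a well-formed run list equals Source B's run scan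
theorem pvFA_best {segs : List (Int × Int)} (h : pvWF1 segs) :
    ∀ (l : Int), 1 ≤ l → pvFA (pvExpand segs) l 0 0 = pvBestLoop segs l := by
  induction h with
  | nil =>
    intro l hl
    simp [pvExpand, pvFA, pvBestLoop]
  | single r hr =>
    intro l hl
    rw [pvExpand_cons, show pvExpand [] = [] from rfl]
    have hrn : r.toNat = (r.toNat - 1) + 1 := by omega
    rw [hrn, pvFA_run, pvBestLoop_single]
    have hcr : ((r.toNat - 1 + 1 : Nat) : Int) = r := by omega
    rw [hcr]
    simp only [pvFA, zero_add]
    omega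
  | cons r z rest hr hz hne hrest ih =>
    intro l hl
    obtain ⟨rb, tail, hrs, hrb⟩ := pvWF1_head hrest hne
    rw [pvExpand_cons, pvExpand_cons]
    have hrn : r.toNat = (r.toNat - 1) + 1 := by omega
    rw [hrn, pvFA_run]
    have hcr : ((r.toNat - 1 + 1 : Nat) : Int) = r := by omega
    rw [hcr]
    have hhead : (pvExpand rest).headD 0 = 1 := pvExpandHead hrest hne
    by_cases hz1 : z = 1
    · subst hz1
      rw [show ((1:Int)).toNat = 1 from rfl, show List.replicate 1 (0:Int) = [0] from rfl,
          List.cons_append, List.nil_append]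
      rw [pvFA_zero_one _ _ _ _ hhead]
      simp only [zero_add]
      rw [pvFA_bridge hrest rb tail hrs _ r (by omega)]
      rw [ih (max (r + rb + 1) (max (r + 1) (max (r + 1) l))) (by omega)]
      show pvBestLoop rest _ = pvBestLoop ((1, r) :: (0, 1) :: rest) l
      rw [hrs, pvBestLoop_three, if_pos rfl]
      congr 1
      omega
    · have hz2 : 2 ≤ z := by omega
      have hzn : z.toNat = ((z.toNat - 2) + 1) + 1 := by omega
      rw [hzn, List.replicate_succ, List.cons_append]
      rw [pvFA_zero_zero _ _ _ _ (by rw [List.replicate_succ]; rfl)]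
      rw [pvFA_zeros _ _ _ hhead]
      simp only [zero_add]
      rw [show (max 1 (max 1 (max (r + 1) l))) = max (r + 1) l from by omega]
      rw [ih (max (r + 1) l) (by omega)]
      show pvBestLoop rest _ = pvBestLoop ((1, r) :: (0, z) :: rest) l
      rw [hrs, pvBestLoop_three, if_neg hz1]
      congr 1
      omega

theorem flip_to_win_eq_alt (v : Int) : flip_to_win v = flip_to_win_alt v := by
  unfold flip_to_win flip_to_win_alt
  rw [pvCorr]
  by_cases hv : v = 0
  · subst hv
    rw [(pvBits_nil 0).mpr rfl]
    simp [pvFA, pvCollapse, pvBestLoop]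
  · rcases pvCollapseShapeAux (pvBitsOf v).length (pvBitsOf v) le_rfl (pvBits01 v) (pvBitsLast v hv)
      with ⟨hhd, hwf, hne⟩ | ⟨z, tail, hhd, hcol, hz, hwf, hne⟩
    · obtain ⟨r, tail, hcol, hr⟩ := pvWF1_head hwf hne
      rw [show pvFA (pvBitsOf v) 1 0 0 = pvFA (pvExpand (pvCollapse (pvBitsOf v))) 1 0 0 from by
        rw [pvExpandCollapse]]
      rw [pvFA_best hwf 1 le_rfl, hcol]
      norm_num
    · rw [show pvFA (pvBitsOf v) 1 0 0 = pvFA (pvExpand (pvCollapse (pvBitsOf v))) 1 0 0 from by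
        rw [pvExpandCollapse]]
      rw [hcol, pvExpand_cons]
      have hzn : z.toNat = (z.toNat - 1) + 1 := by omega
      rw [hzn, pvFA_zeros _ _ _ (pvExpandHead hwf hne)]
      rw [show max (1:Int) 1 = 1 from by omega]
      rw [pvFA_best hwf 1 le_rfl]
      norm_num

-- ===== VERDICT (by name: the statement is the Claim_ definition above) =====
theorem flip_to_win_spec : Claim_equal_flip_to_win := by
  intro v _
  unfold Spec_flip_to_win
  exact flip_to_win_eq_alt v
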